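-- pv_equiv track=rewrite | github.com/pypi-data/pypi-mirror-225 | packages/othello-ai-python/othello_ai_python-0.2-py2-none-any.whl/othello_ai_python/alphabeta.py | process
-- ===== SOURCE A (Python) =====
-- def process(array):
--     size = len(array[0])
--     new_array = []
--     pieces = [0, 1, -1]
--
--     for i in range(3):
--         board = []
--         for j in range(size):
--             row = []
--             for k in range(size):
--                 row.append(int(array[j][k] == pieces[i]))
--             board.append(row)
--         new_array.append(board)
--
--     return new_array
-- ===== SOURCE B (Python) =====
-- def process(array):
--     size = len(array[0])
--     board0, board1, boardm = [], [], []
--     for j in range(size):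
--         row0, row1, rowm = [], [], []
--         for k in range(size):
--             v = array[j][k]
--             row0.append(int(v == 0))
--             row1.append(int(v == 1))
--             rowm.append(int(v == -1))
--         board0.append(row0)
--         board1.append(row1)
--         boardm.append(rowm)
--     return [board0, board1, boardm]
-- ===== Notes on version B (the rewrite author's own statement) =====
-- stated objective: alternative
-- what changed: B traverses the board once, reading each cell a single time and fanning it out into the three one-hot boards simultaneously, instead of A's three independent full scans (one per piece value).
import Mathlib
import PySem

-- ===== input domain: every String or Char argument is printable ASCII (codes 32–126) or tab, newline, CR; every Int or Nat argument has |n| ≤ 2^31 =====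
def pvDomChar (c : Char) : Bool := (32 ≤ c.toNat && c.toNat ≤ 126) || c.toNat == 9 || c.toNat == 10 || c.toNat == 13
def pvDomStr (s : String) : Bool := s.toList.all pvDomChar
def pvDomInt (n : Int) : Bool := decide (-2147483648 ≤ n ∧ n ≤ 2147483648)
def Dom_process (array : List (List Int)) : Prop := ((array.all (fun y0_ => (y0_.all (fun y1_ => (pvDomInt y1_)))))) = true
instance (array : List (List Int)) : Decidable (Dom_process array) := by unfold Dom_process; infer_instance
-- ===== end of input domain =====

-- int(bool) in Python
def pvBoolInt (b : Bool) : Int := if b then 1 else 0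

-- ===== PORT A =====
-- A: for each of the three piece values in turn, scan the whole board and build its one-hot board.
def process (array : List (List Int)) : List (List (List Int)) :=
  let size : Int := (PySem.List.pyGetD array 0 []).length
  let pieces : List Int := [0, 1, -1]
  (PySem.List.pyRange 0 3 1).foldl (fun new_array i =>
    let board := (PySem.List.pyRange 0 size 1).foldl (fun board j =>
      let row := (PySem.List.pyRange 0 size 1).foldl (fun row k =>
        row ++ [pvBoolInt (PySem.List.pyGetD (PySem.List.pyGetD array j []) k 0
                             == PySem.List.pyGetD pieces i 0)]) []
      board ++ [row]) []
    new_array ++ [board]) []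

-- ===== PORT B =====
-- B: one pass over the board; each cell is read once and fanned out into the three boards.
def process_alt (array : List (List Int)) : List (List (List Int)) :=
  let size : Int := (PySem.List.pyGetD array 0 []).length
  let boards :=
    (PySem.List.pyRange 0 size 1).foldl
      (fun (b : List (List Int) × List (List Int) × List (List Int)) j =>
        let rows :=
          (PySem.List.pyRange 0 size 1).foldl
            (fun (r : List Int × List Int × List Int) k =>
              let v := PySem.List.pyGetD (PySem.List.pyGetD array j []) k 0
              (r.1 ++ [pvBoolInt (v == 0)],
               r.2.1 ++ [pvBoolInt (v == 1)],
               r.2.2 ++ [pvBoolInt (v == -1)]))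
            ([], [], [])
        (b.1 ++ [rows.1], b.2.1 ++ [rows.2.1], b.2.2 ++ [rows.2.2]))
      ([], [], [])
  [boards.1, boards.2.1, boards.2.2]

-- ===== PRECONDITION & SPEC =====
-- Pre_ excludes exactly the inputs on which the Python A raises IndexError:
-- the empty list (array[0]), and boards whose first len(array[0]) rows are missing or shorter than len(array[0]).
def Pre_process (array : List (List Int)) : Prop :=
  array ≠ [] ∧ (array.headD []).length ≤ array.length ∧
    ∀ r ∈ array.take (array.headD []).length, (array.headD []).length ≤ r.length
instance (array : List (List Int)) : Decidable (Pre_process array) := by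
  unfold Pre_process; infer_instance
def pvWitness_process : List (List Int) := [[0, 1], [-1, 0]]
def Spec_process (array : List (List Int)) (out : List (List (List Int))) : Prop := out = process_alt array
instance (array : List (List Int)) (out : List (List (List Int))) : Decidable (Spec_process array out) := by unfold Spec_process; infer_instance

-- ===== CLAIM (what is proved, stated in full; the proofs are below) =====
def Claim_equal_process : Prop := ∀ (array : List (List Int)), Dom_process array → Pre_process array → Spec_process array (process array)

-- ===== LEMMAS AND PROOFS =====

-- A's loop shape: append-build = map
theorem pv_foldl_map {α β : Type} (l : List α) (f : α → β) (init : List β) :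
    l.foldl (fun acc x => acc ++ [f x]) init = init ++ l.map f := by
  induction l generalizing init with
  | nil => simp
  | cons x xs ih => simp [List.foldl, ih, List.append_assoc]

-- B's loop shape: the simultaneous triple append-build = triple of maps
theorem pv_foldl_triple {α β : Type} (l : List α) (f g h : α → β)
    (a b c : List β) :
    l.foldl (fun (t : List β × List β × List β) x =>
        (t.1 ++ [f x], t.2.1 ++ [g x], t.2.2 ++ [h x])) (a, b, c)
      = (a ++ l.map f, b ++ l.map g, c ++ l.map h) := by
  induction l generalizing a b c with
  | nil => simp
  | cons x xs ih => simp [List.foldl, ih, List.append_assoc]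

theorem process_eq_canonical (array : List (List Int)) :
    process array =
      [0, 1, -1].map (fun p =>
        (PySem.List.pyRange 0 ((PySem.List.pyGetD array 0 []).length : Int) 1).map (fun j =>
          (PySem.List.pyRange 0 ((PySem.List.pyGetD array 0 []).length : Int) 1).map (fun k =>
            pvBoolInt (PySem.List.pyGetD (PySem.List.pyGetD array j []) k 0 == p)))) := by
  unfold process
  have h3 : PySem.List.pyRange 0 3 1 = [0, 1, 2] := by decide
  rw [h3]
  simp only [List.foldl, pv_foldl_map, List.nil_append]
  norm_num [List.map, PySem.List.pyGetD]
  intros; rw [show ([0, 1, -1] : List Int)[Int.toNat 2] = -1 from by decide]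

theorem process_spec_aux (array : List (List Int)) :
    process array = process_alt array := by
  rw [process_eq_canonical]
  unfold process_alt
  simp only [pv_foldl_triple, List.nil_append, List.map]

-- ===== VERDICT (by name: the statement is the Claim_ definition above) =====
theorem process_spec : Claim_equal_process := by
  intro array _ _
  unfold Spec_process
  exact process_spec_aux array
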